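-- pv_equiv track=rewrite | github.com/Rejean-McCormick/Konnaxion | scriptFixEndPoints/endpoint_corrector.py | iter_string_spans_js
-- ===== SOURCE A (Python) =====
-- def iter_string_spans_js(text:str):
--     """
--     Yield (start,end) for string-literal spans:
--     - '...'
--     - "..."
--     - template literals: emit quasi segments outside ${...}
--     """
--     n = len(text)
--     i = 0
--     while i < n:
--         c = text[i]
--         if c in ("'", '"'):
--             quote = c; start = i+1; i += 1
--             while i < n:
--                 ch = text[i]
--                 if ch == "\\":
--                     i += 2; continue
--                 if ch == quote:
--                     yield (start, i)
--                     i += 1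
--                     break
--                 i += 1
--             continue
--         if c == "`":
--             i += 1
--             start_quasi = i
--             depth = 0
--             while i < n:
--                 ch = text[i]
--                 if ch == "\\":
--                     i += 2; continue
--                 if ch == "$" and i+1 < n and text[i+1] == "{":
--                     # flush quasi before expression
--                     if start_quasi < i:
--                         yield (start_quasi, i)
--                     i += 2
--                     depth = 1
--                     # skip expression including nested braces
--                     while i < n and depth > 0:
--                         ch2 = text[i]
--                         if ch2 == "\\":
--                             i += 2; continue
--                         if ch2 == "{":
--                             depth += 1
--                         elif ch2 == "}":
--                             depth -= 1
--                         i += 1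
--                     start_quasi = i
--                     continue
--                 if ch == "`":
--                     if start_quasi < i:
--                         yield (start_quasi, i)
--                     i += 1
--                     break
--                 i += 1
--             continue
--         i += 1
-- ===== SOURCE B (Python) =====
-- def iter_string_spans_js(text: str):
--     """
--     Yield (start, end) for string-literal spans, as one flat state machine:
--     states: 0 NORMAL, 1 IN_SINGLE, 2 IN_DOUBLE, 3 IN_QUASI, 4 IN_EXPR.
--     """
--     n = len(text)
--     i = 0
--     state = 0
--     depth = 0
--     start = 0
--     while i < n:
--         c = text[i]
--         if state == 0:
--             if c == "'":
--                 state = 1; start = i + 1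
--             elif c == '"':
--                 state = 2; start = i + 1
--             elif c == "`":
--                 state = 3; start = i + 1
--             i += 1
--         elif state == 1 or state == 2:
--             if c == "\\":
--                 i += 2
--             elif c == ("'" if state == 1 else '"'):
--                 yield (start, i)
--                 state = 0
--                 i += 1
--             else:
--                 i += 1
--         elif state == 3:
--             if c == "\\":
--                 i += 2
--             elif c == "$" and i + 1 < n and text[i + 1] == "{":
--                 if start < i:
--                     yield (start, i)
--                 state = 4; depth = 1
--                 i += 2
--             elif c == "`":
--                 if start < i:
--                     yield (start, i)
--                 state = 0
--                 i += 1
--             else: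
--                 i += 1
--         else:  # state == 4, inside ${...}: only braces and backslashes matter
--             if c == "\\":
--                 i += 2
--             else:
--                 if c == "{":
--                     depth += 1
--                 elif c == "}":
--                     depth -= 1
--                 i += 1
--                 if depth == 0:
--                     state = 3; start = i
-- ===== Notes on version B (the rewrite author's own statement) =====
-- stated objective: alternative
-- what changed: A's nested while-loops (outer scanner with three inner loops for string, template and ${...} expression) are replaced by a single flat while-loop driven by an explicit state variable (NORMAL/IN_SINGLE/IN_DOUBLE/IN_QUASI/IN_EXPR) with a brace-depth counter and a span-start marker.
import Mathlib
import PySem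

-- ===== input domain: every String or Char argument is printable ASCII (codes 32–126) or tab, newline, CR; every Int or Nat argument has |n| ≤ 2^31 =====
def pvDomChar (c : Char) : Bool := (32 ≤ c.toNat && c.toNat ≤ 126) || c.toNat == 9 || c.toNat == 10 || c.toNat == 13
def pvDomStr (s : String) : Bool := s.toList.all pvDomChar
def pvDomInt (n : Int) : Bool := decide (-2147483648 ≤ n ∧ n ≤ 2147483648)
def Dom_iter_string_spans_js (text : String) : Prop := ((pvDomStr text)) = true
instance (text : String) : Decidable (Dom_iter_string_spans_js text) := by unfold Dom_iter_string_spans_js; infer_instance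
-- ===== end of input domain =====

-- B replaces A's nested while-loops by one flat state-machine loop (same one-pass O(n) cost); return values only (generators are listed).

-- ===== PORT A =====
-- termination helpers for the ports' loops (cited by name in decreasing_by)
theorem pv_sub_lt1 {n i : Nat} (h : i < n) : n - (i+1) < n - i :=
  Nat.sub_lt_sub_left h (Nat.lt_succ_self i)
theorem pv_sub_lt2 {n i : Nat} (h : i < n) : n - (i+2) < n - i :=
  Nat.sub_lt_sub_left h (Nat.lt_succ_of_lt (Nat.lt_succ_self i))
theorem pv_no_step {n i : Nat} (h : n - i ≤ 0) : ¬ i < n := by omega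
theorem pv_fuel1 {n i k : Nat} (hn : i < n) (h : n - i ≤ k + 1) : n - (i+1) ≤ k := by omega
theorem pv_fuel2 {n i k : Nat} (hn : i < n) (h : n - i ≤ k + 1) : n - (i+2) ≤ k := by omega
theorem pv_fuel_le {n i j k : Nat} (hn : i < n) (h : n - i ≤ k + 1) (hj : i + 1 ≤ j) : n - j ≤ k := by omega
theorem pv_sub_lt_le1 {n i j : Nat} (h : i < n) (hj : i + 1 ≤ j) : n - j < n - i :=
  Nat.sub_lt_sub_left h (Nat.lt_of_lt_of_le (Nat.lt_succ_self i) hj)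
theorem pv_sub_lt_le {n i j : Nat} (h : i < n) (hj : i + 2 ≤ j) : n - j < n - i :=
  Nat.sub_lt_sub_left h (Nat.lt_of_lt_of_le (Nat.lt_succ_of_lt (Nat.lt_succ_self i)) hj)

-- inner `while i < n` of the string-literal branch: returns (yields, i after the loop)
def aStrLoop (cs : List Char) (n : Nat) (quote : Char) (start i : Nat) : List (Nat × Nat) × Nat :=
  if _h : i < n then
    if cs.getD i ' ' == '\\' then aStrLoop cs n quote start (i+2)
    else if cs.getD i ' ' == quote then ([(start, i)], i+1)
    else aStrLoop cs n quote start (i+1)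
  else ([], i)
termination_by n - i
decreasing_by
  · exact pv_sub_lt2 _h
  · exact pv_sub_lt1 _h

-- innermost `while i < n and depth > 0` expression skipper: returns i after the loop
def aExprLoop (cs : List Char) (n : Nat) (depth i : Nat) : Nat :=
  if _h : i < n ∧ 0 < depth then
    if cs.getD i ' ' == '\\' then aExprLoop cs n depth (i+2)
    else if cs.getD i ' ' == '{' then aExprLoop cs n (depth+1) (i+1)
    else if cs.getD i ' ' == '}' then aExprLoop cs n (depth-1) (i+1)
    else aExprLoop cs n depth (i+1)
  else i
termination_by n - i
decreasing_by
  · exact pv_sub_lt2 _h.1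
  · exact pv_sub_lt1 _h.1
  · exact pv_sub_lt1 _h.1
  · exact pv_sub_lt1 _h.1

theorem aExprLoop_le (cs : List Char) (n : Nat) : ∀ depth i, i ≤ aExprLoop cs n depth i := by
  have H : ∀ k depth i, n - i ≤ k → i ≤ aExprLoop cs n depth i := by
    intro k
    induction k with
    | zero =>
      intro depth i h
      rw [aExprLoop, dif_neg (fun hc : i < n ∧ 0 < depth => pv_no_step h hc.1)]
    | succ k ih =>
      intro depth i h
      by_cases hn : i < n ∧ 0 < depth
      · rw [aExprLoop, dif_pos hn]
        split_ifs
        · exact Nat.le_trans (Nat.le_add_right i 2) (ih depth (i+2) (pv_fuel2 hn.1 h))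
        · exact Nat.le_trans (Nat.le_add_right i 1) (ih (depth+1) (i+1) (pv_fuel1 hn.1 h))
        · exact Nat.le_trans (Nat.le_add_right i 1) (ih (depth-1) (i+1) (pv_fuel1 hn.1 h))
        · exact Nat.le_trans (Nat.le_add_right i 1) (ih depth (i+1) (pv_fuel1 hn.1 h))
      · rw [aExprLoop, dif_neg hn]
  exact fun depth i => H (n - i) depth i le_rfl

-- the `while i < n` of the template-literal branch: returns (yields, i after the loop)
def aQuasiLoop (cs : List Char) (n : Nat) (sq i : Nat) : List (Nat × Nat) × Nat :=
  if _h : i < n then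
    if cs.getD i ' ' == '\\' then aQuasiLoop cs n sq (i+2)
    else if cs.getD i ' ' == '$' && decide (i+1 < n) && (cs.getD (i+1) ' ' == '{') then
      ((if sq < i then [(sq, i)] else []) ++ (aQuasiLoop cs n (aExprLoop cs n 1 (i+2)) (aExprLoop cs n 1 (i+2))).1,
       (aQuasiLoop cs n (aExprLoop cs n 1 (i+2)) (aExprLoop cs n 1 (i+2))).2)
    else if cs.getD i ' ' == '`' then ((if sq < i then [(sq, i)] else []), i+1)
    else aQuasiLoop cs n sq (i+1)
  else ([], i)
termination_by n - i
decreasing_by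
  · exact pv_sub_lt2 _h
  · exact pv_sub_lt_le _h (aExprLoop_le cs n 1 (i+2))
  · exact pv_sub_lt1 _h

theorem aStrLoop_le (cs : List Char) (n : Nat) (quote : Char) : ∀ start i, i ≤ (aStrLoop cs n quote start i).2 := by
  have H : ∀ k start i, n - i ≤ k → i ≤ (aStrLoop cs n quote start i).2 := by
    intro k
    induction k with
    | zero =>
      intro start i h
      rw [aStrLoop, dif_neg (pv_no_step h)]
    | succ k ih =>
      intro start i h
      by_cases hn : i < n
      · rw [aStrLoop, dif_pos hn]
        split_ifs
        · exact Nat.le_trans (Nat.le_add_right i 2) (ih start (i+2) (pv_fuel2 hn h))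
        · exact Nat.le_succ i
        · exact Nat.le_trans (Nat.le_add_right i 1) (ih start (i+1) (pv_fuel1 hn h))
      · rw [aStrLoop, dif_neg hn]
  exact fun start i => H (n - i) start i le_rfl

theorem aQuasiLoop_le (cs : List Char) (n : Nat) : ∀ sq i, i ≤ (aQuasiLoop cs n sq i).2 := by
  have H : ∀ k sq i, n - i ≤ k → i ≤ (aQuasiLoop cs n sq i).2 := by
    intro k
    induction k with
    | zero =>
      intro sq i h
      rw [aQuasiLoop, dif_neg (pv_no_step h)]
    | succ k ih =>
      intro sq i h
      by_cases hn : i < n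
      · have he : i + 2 ≤ aExprLoop cs n 1 (i+2) := aExprLoop_le cs n 1 (i+2)
        have h2 := ih (aExprLoop cs n 1 (i+2)) (aExprLoop cs n 1 (i+2))
          (pv_fuel_le hn h (Nat.le_trans (Nat.le_succ _) he))
        rw [aQuasiLoop, dif_pos hn]
        split_ifs
        all_goals first
          | exact Nat.le_trans (Nat.le_add_right i 2) (ih sq (i+2) (pv_fuel2 hn h))
          | exact Nat.le_trans (Nat.le_trans (Nat.le_add_right i 2) he) h2
          | exact Nat.le_succ i
          | exact Nat.le_trans (Nat.le_add_right i 1) (ih sq (i+1) (pv_fuel1 hn h))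
      · rw [aQuasiLoop, dif_neg hn]
  exact fun sq i => H (n - i) sq i le_rfl

-- the outer `while i < n`
def aOuter (cs : List Char) (n : Nat) (i : Nat) : List (Nat × Nat) :=
  if _h : i < n then
    if cs.getD i ' ' == '\'' || cs.getD i ' ' == '"' then
      (aStrLoop cs n (cs.getD i ' ') (i+1) (i+1)).1 ++ aOuter cs n (aStrLoop cs n (cs.getD i ' ') (i+1) (i+1)).2
    else if cs.getD i ' ' == '`' then
      (aQuasiLoop cs n (i+1) (i+1)).1 ++ aOuter cs n (aQuasiLoop cs n (i+1) (i+1)).2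
    else aOuter cs n (i+1)
  else []
termination_by n - i
decreasing_by
  · exact pv_sub_lt_le1 _h (aStrLoop_le cs n (cs.getD i ' ') (i+1) (i+1))
  · exact pv_sub_lt_le1 _h (aQuasiLoop_le cs n (i+1) (i+1))
  · exact pv_sub_lt1 _h

def iter_string_spans_js (text : String) : List (Int × Int) :=
  (aOuter text.toList text.toList.length 0).map (fun p => ((p.1 : Int), (p.2 : Int)))

-- ===== PORT B =====
-- one flat loop; state: 0 NORMAL, 1 IN_SINGLE, 2 IN_DOUBLE, 3 IN_QUASI, 4 IN_EXPR
def bLoop (cs : List Char) (n : Nat) (state depth start i : Nat) : List (Nat × Nat) :=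
  if _h : i < n then
    if state == 0 then
      if cs.getD i ' ' == '\'' then bLoop cs n 1 depth (i+1) (i+1)
      else if cs.getD i ' ' == '"' then bLoop cs n 2 depth (i+1) (i+1)
      else if cs.getD i ' ' == '`' then bLoop cs n 3 depth (i+1) (i+1)
      else bLoop cs n 0 depth start (i+1)
    else if state == 1 || state == 2 then
      if cs.getD i ' ' == '\\' then bLoop cs n state depth start (i+2)
      else if cs.getD i ' ' == (if state == 1 then '\'' else '"') then
        (start, i) :: bLoop cs n 0 depth start (i+1)
      else bLoop cs n state depth start (i+1)
    else if state == 3 then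
      if cs.getD i ' ' == '\\' then bLoop cs n 3 depth start (i+2)
      else if cs.getD i ' ' == '$' && decide (i+1 < n) && (cs.getD (i+1) ' ' == '{') then
        (if start < i then [(start, i)] else []) ++ bLoop cs n 4 1 start (i+2)
      else if cs.getD i ' ' == '`' then
        (if start < i then [(start, i)] else []) ++ bLoop cs n 0 depth start (i+1)
      else bLoop cs n 3 depth start (i+1)
    else
      if cs.getD i ' ' == '\\' then bLoop cs n 4 depth start (i+2)
      else
        if (if cs.getD i ' ' == '{' then depth+1 else if cs.getD i ' ' == '}' then depth-1 else depth) == 0 then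
          bLoop cs n 3 (if cs.getD i ' ' == '{' then depth+1 else if cs.getD i ' ' == '}' then depth-1 else depth) (i+1) (i+1)
        else
          bLoop cs n 4 (if cs.getD i ' ' == '{' then depth+1 else if cs.getD i ' ' == '}' then depth-1 else depth) start (i+1)
  else []
termination_by n - i
decreasing_by all_goals first
  | exact pv_sub_lt1 _h
  | exact pv_sub_lt2 _h

def iter_string_spans_js_alt (text : String) : List (Int × Int) :=
  (bLoop text.toList text.toList.length 0 0 0 0).map (fun p => ((p.1 : Int), (p.2 : Int)))

-- ===== PRECONDITION & SPEC =====
def Spec_iter_string_spans_js (text : String) (out : List (Int × Int)) : Prop := out = iter_string_spans_js_alt text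
instance (text : String) (out : List (Int × Int)) : Decidable (Spec_iter_string_spans_js text out) := by unfold Spec_iter_string_spans_js; infer_instance

-- ===== CLAIM (what is proved, stated in full; the proofs are below) =====
def Claim_equal_iter_string_spans_js : Prop := ∀ (text : String), Dom_iter_string_spans_js text → Spec_iter_string_spans_js text (iter_string_spans_js text)

-- ===== LEMMAS AND PROOFS =====

-- both loops terminated: everything past the end of the input yields nothing
theorem main_base (cs : List Char) (n : Nat) (i : Nat) (hn : ¬ i < n) :
    (∀ d s, bLoop cs n 0 d s i = aOuter cs n i) ∧
    (∀ d s, bLoop cs n 1 d s i =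
      (aStrLoop cs n '\'' s i).1 ++ aOuter cs n (aStrLoop cs n '\'' s i).2) ∧
    (∀ d s, bLoop cs n 2 d s i =
      (aStrLoop cs n '"' s i).1 ++ aOuter cs n (aStrLoop cs n '"' s i).2) ∧
    (∀ d s, bLoop cs n 3 d s i =
      (aQuasiLoop cs n s i).1 ++ aOuter cs n (aQuasiLoop cs n s i).2) ∧
    (∀ d s, 0 < d → bLoop cs n 4 d s i =
      (aQuasiLoop cs n (aExprLoop cs n d i) (aExprLoop cs n d i)).1 ++
        aOuter cs n (aQuasiLoop cs n (aExprLoop cs n d i) (aExprLoop cs n d i)).2) := by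
  refine ⟨?_, ?_, ?_, ?_, ?_⟩
  · intro d s; rw [bLoop, dif_neg hn, aOuter, dif_neg hn]
  · intro d s; rw [bLoop, dif_neg hn, aStrLoop, dif_neg hn]; simp [aOuter, hn]
  · intro d s; rw [bLoop, dif_neg hn, aStrLoop, dif_neg hn]; simp [aOuter, hn]
  · intro d s; rw [bLoop, dif_neg hn, aQuasiLoop, dif_neg hn]; simp [aOuter, hn]
  · intro d s _; rw [bLoop, dif_neg hn, aExprLoop]
    simp [hn, aQuasiLoop, aOuter]

theorem main_inv (cs : List Char) (n : Nat) : ∀ k i, n - i ≤ k →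
    (∀ d s, bLoop cs n 0 d s i = aOuter cs n i) ∧
    (∀ d s, bLoop cs n 1 d s i =
      (aStrLoop cs n '\'' s i).1 ++ aOuter cs n (aStrLoop cs n '\'' s i).2) ∧
    (∀ d s, bLoop cs n 2 d s i =
      (aStrLoop cs n '"' s i).1 ++ aOuter cs n (aStrLoop cs n '"' s i).2) ∧
    (∀ d s, bLoop cs n 3 d s i =
      (aQuasiLoop cs n s i).1 ++ aOuter cs n (aQuasiLoop cs n s i).2) ∧
    (∀ d s, 0 < d → bLoop cs n 4 d s i =
      (aQuasiLoop cs n (aExprLoop cs n d i) (aExprLoop cs n d i)).1 ++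
        aOuter cs n (aQuasiLoop cs n (aExprLoop cs n d i) (aExprLoop cs n d i)).2) := by
  intro k
  induction k with
  | zero =>
    intro i h
    exact main_base cs n i (by omega)
  | succ k ih =>
    intro i h
    by_cases hn : i < n
    · have h1 : n - (i+1) ≤ k := by omega
      have h2 : n - (i+2) ≤ k := by omega
      have IH0 : ∀ j, n - j ≤ k → ∀ d s, bLoop cs n 0 d s j = aOuter cs n j :=
        fun j hj => (ih j hj).1
      have IH1 : ∀ j, n - j ≤ k → ∀ d s, bLoop cs n 1 d s j =
          (aStrLoop cs n '\'' s j).1 ++ aOuter cs n (aStrLoop cs n '\'' s j).2 :=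
        fun j hj => (ih j hj).2.1
      have IH2 : ∀ j, n - j ≤ k → ∀ d s, bLoop cs n 2 d s j =
          (aStrLoop cs n '"' s j).1 ++ aOuter cs n (aStrLoop cs n '"' s j).2 :=
        fun j hj => (ih j hj).2.2.1
      have IH3 : ∀ j, n - j ≤ k → ∀ d s, bLoop cs n 3 d s j =
          (aQuasiLoop cs n s j).1 ++ aOuter cs n (aQuasiLoop cs n s j).2 :=
        fun j hj => (ih j hj).2.2.2.1
      have IH4 : ∀ j, n - j ≤ k → ∀ d s, 0 < d → bLoop cs n 4 d s j =
          (aQuasiLoop cs n (aExprLoop cs n d j) (aExprLoop cs n d j)).1 ++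
            aOuter cs n (aQuasiLoop cs n (aExprLoop cs n d j) (aExprLoop cs n d j)).2 :=
        fun j hj => (ih j hj).2.2.2.2
      refine ⟨?_, ?_, ?_, ?_, ?_⟩
      · -- NORMAL state vs A's outer loop
        intro d s
        rw [bLoop, dif_pos hn, aOuter, dif_pos hn]
        by_cases hc1 : cs[i]?.getD ' ' = '\''
        · simp [hc1]; exact IH1 (i+1) h1 d (i+1)
        · by_cases hc2 : cs[i]?.getD ' ' = '"'
          · simp [hc1, hc2]; exact IH2 (i+1) h1 d (i+1)
          · by_cases hc3 : cs[i]?.getD ' ' = '`'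
            · simp [hc1, hc2, hc3]; exact IH3 (i+1) h1 d (i+1)
            · simp [hc1, hc2, hc3]; exact IH0 (i+1) h1 d s
      · -- IN_SINGLE vs A's string inner loop
        intro d s
        rw [bLoop, dif_pos hn, aStrLoop, dif_pos hn]
        by_cases hb : cs[i]?.getD ' ' = '\\'
        · simp [hb]; exact IH1 (i+2) h2 d s
        · by_cases hq : cs[i]?.getD ' ' = '\''
          · simp [hb, hq, IH0 (i+1) h1 d s]
          · simp [hb, hq]; exact IH1 (i+1) h1 d s
      · -- IN_DOUBLE vs A's string inner loop
        intro d s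
        rw [bLoop, dif_pos hn, aStrLoop, dif_pos hn]
        by_cases hb : cs[i]?.getD ' ' = '\\'
        · simp [hb]; exact IH2 (i+2) h2 d s
        · by_cases hq : cs[i]?.getD ' ' = '"'
          · simp [hb, hq, IH0 (i+1) h1 d s]
          · simp [hb, hq]; exact IH2 (i+1) h1 d s
      · -- IN_QUASI vs A's template inner loop
        intro d s
        rw [bLoop, dif_pos hn, aQuasiLoop, dif_pos hn]
        by_cases hb : cs[i]?.getD ' ' = '\\'
        · simp [hb]; exact IH3 (i+2) h2 d s
        · by_cases hds : cs[i]?.getD ' ' = '$'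
          · by_cases hlt : i + 1 < n
            · by_cases hbr : cs[i+1]?.getD ' ' = '{'
              · simp [hb, hds, hlt, hbr, IH4 (i+2) h2 1 s (by omega)]
              · simp [hb, hds, hlt, hbr]; exact IH3 (i+1) h1 d s
            · simp [hb, hds, hlt]; exact IH3 (i+1) h1 d s
          · by_cases hbt : cs[i]?.getD ' ' = '`'
            · simp [hb, hds, hbt, IH0 (i+1) h1 d s]
            · simp [hb, hds, hbt]; exact IH3 (i+1) h1 d s
      · -- IN_EXPR vs A's ${...} skipper
        intro d s hd
        rw [bLoop, dif_pos hn, aExprLoop, dif_pos ⟨hn, hd⟩]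
        by_cases hb : cs[i]?.getD ' ' = '\\'
        · simp [hb]; exact IH4 (i+2) h2 d s hd
        · by_cases hob : cs[i]?.getD ' ' = '{'
          · simp [hb, hob]; exact IH4 (i+1) h1 (d+1) s (by omega)
          · by_cases hcb : cs[i]?.getD ' ' = '}'
            · by_cases hd1 : d = 1
              · subst hd1
                simp [hb, hob, hcb, aExprLoop]
                exact IH3 (i+1) h1 0 (i+1)
              · have hne : ¬ (d - 1 = 0) := by omega
                simp [hb, hob, hcb, hne]
                exact IH4 (i+1) h1 (d-1) s (by omega)
            · have hne : ¬ (d = 0) := by omega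
              simp [hb, hob, hcb, hne]
              exact IH4 (i+1) h1 d s hd
    · exact main_base cs n i hn

-- ===== VERDICT (by name: the statement is the Claim_ definition above) =====
theorem iter_string_spans_js_spec : Claim_equal_iter_string_spans_js := by
  intro text _
  unfold Spec_iter_string_spans_js iter_string_spans_js iter_string_spans_js_alt
  have h := (main_inv text.toList text.toList.length (text.toList.length) 0 (by omega)).1 0 0
  rw [h]
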